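-- pv_equiv track=rewrite | github.com/lukelu389/pythonProjects | year2023/day2023_08_27.py | strange_operations
-- ===== SOURCE A (Python) =====
-- def strange_operations(sample):
--     output = []
--     i = 0
--     while i < len(sample):
--         prefix = set(sample[0:i+1])
--         suffix = set(sample[i+1:len(sample)])
--         output.append(len(prefix)-len(suffix))
--         i+= 1
--
--     return output
-- ===== SOURCE B (Python) =====
-- def strange_operations(sample):
--     n = len(sample)
--     # suffix_counts[i] = number of distinct chars in sample[i:], suffix_counts[n] = 0
--     suffix_counts = [0] * (n + 1)
--     seen = set()
--     for i in range(n - 1, -1, -1):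
--         seen.add(sample[i])
--         suffix_counts[i] = len(seen)
--     output = []
--     seen = set()
--     for i in range(n):
--         seen.add(sample[i])
--         output.append(len(seen) - suffix_counts[i + 1])
--     return output
-- ===== Notes on version B (the rewrite author's own statement) =====
-- stated objective: faster
-- what changed: Instead of rebuilding set(prefix) and set(suffix) from scratch at every index (quadratic), B precomputes all suffix distinct counts in one right-to-left pass and maintains the prefix set incrementally in one forward pass.
import Mathlib
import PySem

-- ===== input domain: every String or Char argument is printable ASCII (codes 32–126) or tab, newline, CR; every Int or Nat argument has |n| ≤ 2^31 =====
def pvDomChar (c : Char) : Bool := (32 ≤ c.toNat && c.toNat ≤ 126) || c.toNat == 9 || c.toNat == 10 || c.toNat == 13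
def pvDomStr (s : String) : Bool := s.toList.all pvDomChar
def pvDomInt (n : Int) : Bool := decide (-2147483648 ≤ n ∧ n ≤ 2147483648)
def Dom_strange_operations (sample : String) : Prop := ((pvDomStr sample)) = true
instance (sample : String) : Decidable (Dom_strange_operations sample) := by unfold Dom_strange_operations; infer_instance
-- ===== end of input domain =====

-- B replaces A's per-index rebuilding of set(prefix)/set(suffix) by one right-to-left
-- pass precomputing suffix distinct counts and one forward pass with an incremental
-- prefix set (objective: faster, asymptotic).


-- ===== PORT A =====
-- while i < len(sample): prefix = set(sample[0:i+1]); suffix = set(sample[i+1:len]); append(len(prefix)-len(suffix))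
def strange_operations (sample : String) : List Int :=
  let l := sample.toList
  (List.range l.length).map (fun (i : Nat) =>
    let pfx := PySem.Set.ofList (PySem.List.slice l (some 0) (some ((i : Int) + 1)))
    let sfx := PySem.Set.ofList (PySem.List.slice l (some ((i : Int) + 1)) (some (l.length : Int)))
    PySem.Set.len pfx - PySem.Set.len sfx)

-- ===== PORT B =====
-- B's right-to-left pass: returns (seen set, suffix_counts) where suffix_counts is built
-- back-to-front exactly as Source B fills suffix_counts[i] = len(seen) for i = n-1 .. 0
def pvSuffCounts : List Char → PySem.Set Char × List Int
  | [] => (PySem.Set.empty, [(0 : Int)])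
  | c :: cs =>
    let p := pvSuffCounts cs
    let seen := PySem.Set.add p.1 c
    (seen, PySem.Set.len seen :: p.2)

-- B's forward pass: seen.add(ch); output len(seen) - suffix_counts[i+1] (walked along as a list)
def pvForward : List Char → PySem.Set Char → List Int → List Int
  | [], _, _ => []
  | c :: cs, seen, counts =>
    let seen' := PySem.Set.add seen c
    (PySem.Set.len seen' - counts.headD 0) :: pvForward cs seen' counts.tail

def strange_operations_alt (sample : String) : List Int :=
  let l := sample.toList
  pvForward l PySem.Set.empty ((pvSuffCounts l).2.tail)

-- ===== PRECONDITION & SPEC =====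
def Spec_strange_operations (sample : String) (out : List Int) : Prop := out = strange_operations_alt sample
instance (sample : String) (out : List Int) : Decidable (Spec_strange_operations sample out) := by unfold Spec_strange_operations; infer_instance

-- ===== CLAIM (what is proved, stated in full; the proofs are below) =====
def Claim_equal_strange_operations : Prop := ∀ (sample : String), Dom_strange_operations sample → Spec_strange_operations sample (strange_operations sample)

-- ===== LEMMAS AND PROOFS =====

-- common reference computation: walk the string keeping the prefix set
def pvSpec : PySem.Set Char → List Char → List Int
  | _, [] => []
  | seen, c :: cs =>
    let s := PySem.Set.add seen c
    (PySem.Set.len s - PySem.Set.len (PySem.Set.ofList cs)) :: pvSpec s cs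

theorem pvLen_eq_of_nodup {s t : List Char} (hs : s.Nodup) (ht : t.Nodup)
    (h : ∀ x, x ∈ s ↔ x ∈ t) : PySem.Set.len s = PySem.Set.len t := by
  have hp := (List.perm_ext_iff_of_nodup hs ht).mpr h
  unfold PySem.Set.len
  rw [hp.length_eq]

theorem pvSuffCounts_seen (l : List Char) :
    (pvSuffCounts l).1.Nodup ∧ ∀ x, x ∈ (pvSuffCounts l).1 ↔ x ∈ l := by
  induction l with
  | nil => exact ⟨List.nodup_nil, by simp [pvSuffCounts, PySem.Set.empty]⟩
  | cons c cs ih =>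
    refine ⟨PySem.Set.nodup_add _ _ ih.1, fun x => ?_⟩
    simp only [pvSuffCounts, PySem.Set.mem_add, ih.2, List.mem_cons]
    tauto

theorem pvSuffCounts_head (l : List Char) :
    (pvSuffCounts l).2.headD 0 = PySem.Set.len (PySem.Set.ofList l) := by
  cases l with
  | nil => rfl
  | cons c cs =>
    simp only [pvSuffCounts, List.headD_cons]
    exact pvLen_eq_of_nodup (PySem.Set.nodup_add _ _ (pvSuffCounts_seen cs).1)
      (PySem.Set.nodup_ofList _)
      (fun x => by
        simp only [PySem.Set.mem_add, (pvSuffCounts_seen cs).2, PySem.Set.mem_ofList,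
          List.mem_cons]; tauto)

theorem pvForward_eq_spec (l : List Char) (seen : PySem.Set Char) :
    pvForward l seen ((pvSuffCounts l).2.tail) = pvSpec seen l := by
  induction l generalizing seen with
  | nil => rfl
  | cons c cs ih =>
    show pvForward (c :: cs) seen ((pvSuffCounts cs).2) = _
    simp only [pvForward, pvSpec]
    rw [pvSuffCounts_head cs, ← ih]

theorem pvMap_eq_spec (l pre : List Char) :
    (List.range l.length).map (fun i =>
        PySem.Set.len (PySem.Set.ofList (pre ++ l.take (i + 1)))
          - PySem.Set.len (PySem.Set.ofList (l.drop (i + 1))))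
      = pvSpec (PySem.Set.ofList pre) l := by
  induction l generalizing pre with
  | nil => rfl
  | cons c cs ih =>
    simp only [List.length_cons, List.range_succ_eq_map, List.map_cons, List.map_map]
    refine congrArg₂ _ ?_ ?_
    · simp [PySem.Set.ofList_append_singleton]
    · show _ = pvSpec (PySem.Set.add (PySem.Set.ofList pre) c) cs
      rw [← PySem.Set.ofList_append_singleton, ← ih (pre ++ [c])]
      refine List.map_congr_left (fun i _ => ?_)
      simp only [Function.comp, Nat.succ_eq_add_one, List.take_succ_cons,
        List.drop_succ_cons]
      rw [List.append_cons]

theorem strange_operations_eq_spec (l : List Char) :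
    (List.range l.length).map (fun (i : Nat) =>
      PySem.Set.len (PySem.Set.ofList (PySem.List.slice l (some 0) (some ((i : Int) + 1))))
        - PySem.Set.len (PySem.Set.ofList (PySem.List.slice l (some ((i : Int) + 1)) (some (l.length : Int)))))
      = pvSpec (PySem.Set.ofList []) l := by
  rw [← pvMap_eq_spec l []]
  refine List.map_congr_left (fun i _ => ?_)
  have h1 : ((i : Int) + 1) = ((i + 1 : Nat) : Int) := by push_cast; ring
  have h2 : l.length - (i + 1) = (l.drop (i + 1)).length := by simp
  rw [h1, PySem.List.slice_zero_start, PySem.List.slice_to_natCast,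
    PySem.List.slice_natCast, List.nil_append, h2, List.take_length]

-- ===== VERDICT (by name: the statement is the Claim_ definition above) =====
theorem strange_operations_spec : Claim_equal_strange_operations := by
  intro sample _
  show strange_operations sample = strange_operations_alt sample
  unfold strange_operations strange_operations_alt
  rw [pvForward_eq_spec, strange_operations_eq_spec]
  rfl
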